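-- pv_equiv track=rewrite | github.com/chuegue/AoC2024 | day9/main.py | first_and_length_empty
-- ===== SOURCE A (Python) =====
-- def first_and_length_empty(arr, from_idx):
--     length = 0
--     first = -1
--     for i in range(from_idx, len(arr)):
--         if arr[i] != -1: continue
--         for j in range(i + 1, len(arr)):
--             if arr[j] != -1:
--                 return (i, j -i)
--     return (0, -1)
-- ===== SOURCE B (Python) =====
-- def first_and_length_empty(arr, from_idx):
--     first = None
--     for i in range(from_idx, len(arr)):
--         if arr[i] == -1:
--             if first is None:
--                 first = i
--         elif first is not None:
--             return (first, i - first)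
--     return (0, -1)
-- ===== Notes on version B (the rewrite author's own statement) =====
-- stated objective: simpler
-- what changed: Replaced A's nested search-then-scan (outer loop finds a -1, inner loop rescans from i+1 for the run end) by a single stateful pass that records the run start in `first` and returns as soon as a non -1 element follows it.
import Mathlib
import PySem

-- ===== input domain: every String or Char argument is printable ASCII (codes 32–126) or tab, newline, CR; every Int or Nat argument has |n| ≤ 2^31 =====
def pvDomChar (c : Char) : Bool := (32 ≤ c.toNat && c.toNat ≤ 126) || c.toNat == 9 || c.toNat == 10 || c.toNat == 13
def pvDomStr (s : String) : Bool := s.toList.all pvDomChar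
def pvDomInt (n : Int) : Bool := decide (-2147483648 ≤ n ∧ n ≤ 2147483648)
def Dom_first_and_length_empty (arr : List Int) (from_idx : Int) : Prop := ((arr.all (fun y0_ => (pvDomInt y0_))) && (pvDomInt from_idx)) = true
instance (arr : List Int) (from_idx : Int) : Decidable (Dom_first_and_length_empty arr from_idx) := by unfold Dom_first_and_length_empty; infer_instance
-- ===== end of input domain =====

-- B is a single stateful pass (run start kept in `first`) instead of A's nested search-then-scan; same values and same IndexError behaviour.

-- ===== PORT A =====
-- inner loop: for j in range(i + 1, len(arr)): if arr[j] != -1: return (i, j - i)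
-- (falls through with `none`, the outer loop then continues)
def faleInner (arr : List Int) (i : Int) : List Int → Option (Int × Int)
  | [] => none
  | j :: rest =>
      if PySem.List.pyGetD arr j 0 ≠ -1 then some (i, j - i)
      else faleInner arr i rest

-- outer loop over range(from_idx, len(arr))
def faleOuter (arr : List Int) : List Int → Int × Int
  | [] => (0, -1)
  | i :: rest =>
      if PySem.List.pyGetD arr i 0 ≠ -1 then faleOuter arr rest
      else
        match faleInner arr i (PySem.List.pyRange (i + 1) arr.length 1) with
        | some r => r
        | none => faleOuter arr rest

def first_and_length_empty (arr : List Int) (from_idx : Int) : Int × Int :=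
  faleOuter arr (PySem.List.pyRange from_idx arr.length 1)

-- ===== PORT B =====
-- one pass: remember the start of the first -1 run in `first`; return at the first non -1 after it
def faleAltLoop (arr : List Int) (first : Option Int) : List Int → Int × Int
  | [] => (0, -1)
  | i :: rest =>
      if PySem.List.pyGetD arr i 0 == -1 then
        match first with
        | none => faleAltLoop arr (some i) rest
        | some _ => faleAltLoop arr first rest
      else
        match first with
        | some f => (f, i - f)
        | none => faleAltLoop arr none rest

def first_and_length_empty_alt (arr : List Int) (from_idx : Int) : Int × Int :=
  faleAltLoop arr none (PySem.List.pyRange from_idx arr.length 1)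

-- ===== PRECONDITION & SPEC =====
-- A raises IndexError iff the loop reaches an index i < -len(arr); that happens iff from_idx < -len(arr)
-- and the range is nonempty. Pre_ admits exactly the inputs on which A returns.
def Pre_first_and_length_empty (arr : List Int) (from_idx : Int) : Prop :=
  -(arr.length : Int) ≤ from_idx ∨ (arr.length : Int) ≤ from_idx
instance (arr : List Int) (from_idx : Int) : Decidable (Pre_first_and_length_empty arr from_idx) := by unfold Pre_first_and_length_empty; infer_instance

def pvWitness_first_and_length_empty : List Int × Int := ([2, -1, -1, 5, -1], 0)

def Spec_first_and_length_empty (arr : List Int) (from_idx : Int) (out : Int × Int) : Prop := out = first_and_length_empty_alt arr from_idx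
instance (arr : List Int) (from_idx : Int) (out : Int × Int) : Decidable (Spec_first_and_length_empty arr from_idx out) := by unfold Spec_first_and_length_empty; infer_instance

-- ===== CLAIM (what is proved, stated in full; the proofs are below) =====
def Claim_equal_first_and_length_empty : Prop := ∀ (arr : List Int) (from_idx : Int), Dom_first_and_length_empty arr from_idx → Pre_first_and_length_empty arr from_idx → Spec_first_and_length_empty arr from_idx (first_and_length_empty arr from_idx)

-- ===== LEMMAS AND PROOFS =====

-- When B has already recorded `first = some i`, its remaining loop is exactly A's inner scan
-- (falling through means everything left is -1, where both programs end in (0, -1)).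
theorem altLoop_some (arr : List Int) (i : Int) (js : List Int) :
    faleAltLoop arr (some i) js =
      (match faleInner arr i js with
       | some r => r
       | none => (0, -1)) := by
  induction js with
  | nil => rfl
  | cons j rest ih =>
      simp only [faleAltLoop, faleInner]
      by_cases h : PySem.List.pyGetD arr j 0 = -1
      · simp [h, ih]
      · simp [h]

theorem inner_none_all (arr : List Int) (i : Int) (js : List Int)
    (h : faleInner arr i js = none) : ∀ j ∈ js, PySem.List.pyGetD arr j 0 = -1 := by
  induction js with
  | nil => simp
  | cons j rest ih =>
      intro x hx
      simp only [faleInner] at h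
      by_cases hj : PySem.List.pyGetD arr j 0 = -1
      · simp [hj] at h
        rcases List.mem_cons.1 hx with rfl | hx'
        · exact hj
        · exact ih h x hx'
      · simp [hj] at h

theorem inner_all_none (arr : List Int) (i : Int) (js : List Int)
    (h : ∀ j ∈ js, PySem.List.pyGetD arr j 0 = -1) : faleInner arr i js = none := by
  induction js with
  | nil => rfl
  | cons j rest ih =>
      simp only [faleInner]
      have hj := h j (by simp)
      simp [hj]
      exact ih (fun x hx => h x (List.mem_cons_of_mem _ hx))

-- If every remaining element is -1, A's outer loop ends in (0, -1).
theorem outer_all_neg (arr : List Int) (f : Int)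
    (h : ∀ j ∈ PySem.List.pyRange f arr.length 1, PySem.List.pyGetD arr j 0 = -1) :
    faleOuter arr (PySem.List.pyRange f arr.length 1) = (0, -1) := by
  by_cases hfb : f < (arr.length : Int)
  · have hlt : ((arr.length : Int) - f).toNat - (((arr.length : Int) - (f+1)).toNat) = 1 := by omega
    rw [PySem.List.pyRange_one_cons hfb]
    have hf := h f (by rw [PySem.List.pyRange_one_cons hfb]; simp)
    have hrest : ∀ j ∈ PySem.List.pyRange (f+1) arr.length 1, PySem.List.pyGetD arr j 0 = -1 := by
      intro j hj
      exact h j (by rw [PySem.List.pyRange_one_cons hfb]; exact List.mem_cons_of_mem _ hj)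
    simp only [faleOuter, hf]
    simp only [ne_eq, not_true_eq_false, if_false]
    rw [inner_all_none arr f _ hrest]
    exact outer_all_neg arr (f+1) hrest
  · rw [PySem.List.pyRange_one_eq_nil (by omega)]
    rfl
termination_by ((arr.length : Int) - f).toNat
decreasing_by omega

theorem outer_eq_alt (arr : List Int) (f : Int) :
    faleOuter arr (PySem.List.pyRange f arr.length 1) =
      faleAltLoop arr none (PySem.List.pyRange f arr.length 1) := by
  by_cases hfb : f < (arr.length : Int)
  · rw [PySem.List.pyRange_one_cons hfb]
    by_cases hf : PySem.List.pyGetD arr f 0 = -1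
    · simp only [faleOuter, faleAltLoop, hf]
      simp only [ne_eq, not_true_eq_false, if_false, BEq.rfl, if_true]
      rw [altLoop_some]
      cases hinner : faleInner arr f (PySem.List.pyRange (f+1) arr.length 1) with
      | some r => simp
      | none =>
          simp only []
          exact outer_all_neg arr (f+1) (inner_none_all arr f _ hinner)
    · simp only [faleOuter, faleAltLoop]
      have hbeq : (PySem.List.pyGetD arr f 0 == (-1 : Int)) = false := by
        simp [hf]
      simp only [ne_eq, hf, not_false_eq_true, if_true, hbeq, if_false]
      exact outer_eq_alt arr (f+1)
  · rw [PySem.List.pyRange_one_eq_nil (by omega)]; rfl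
termination_by ((arr.length : Int) - f).toNat
decreasing_by omega

-- ===== VERDICT (by name: the statement is the Claim_ definition above) =====
theorem first_and_length_empty_spec : Claim_equal_first_and_length_empty := by
  intro arr from_idx _ _
  unfold Spec_first_and_length_empty first_and_length_empty first_and_length_empty_alt
  exact outer_eq_alt arr from_idx
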